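-- pv_equiv track=rewrite | github.com/luisssSoto/ProgrammingLogicExercises | hackerRank/easy/Jumping on the Clouds Revisited/python/jumpingOnTheCloud.py | jumping_on_clouds
-- ===== SOURCE A (Python) =====
-- def jumping_on_clouds(c: list[int], k:int) -> int:
--     count = 0
--     index = k % len(c)
--     def cumulus_or_thunderheads(cloud):
--         if cloud == 0:
--             return 1
--         else:
--             return 3
--     if index == 0:
--         return 100 - cumulus_or_thunderheads(c[index])
--     while index != 0:
--         count += cumulus_or_thunderheads(c[index])
--         index += k
--         if index >= len(c):
--             index %= len(c)
--         if index == 0: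
--             count += cumulus_or_thunderheads(c[index])
--     return 100 - count
-- ===== SOURCE B (Python) =====
-- def jumping_on_clouds(c: list[int], k: int) -> int:
--     # closed iteration count: the walk lands on (j*k) % n for j = 1 .. n//gcd(n,k)
--     n = len(c)
--     a, b = n, k
--     while b:
--         a, b = b, a % b
--     g = abs(a)
--     steps = n // g
--     cost = 0
--     for j in range(1, steps + 1):
--         cost += 1 if c[(j * k) % n] == 0 else 3
--     return 100 - cost
-- ===== Notes on version B (the rewrite author's own statement) =====
-- stated objective: alternative
-- what changed: Replaces A's data-dependent 'walk until index is 0 again' while-loop (with its start special-case and incremental index reduction) by a fixed-count loop: the number of landings is computed up front as n // gcd(n, k) via a Euclid loop, and each landing position is computed directly as (j*k) % n.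
import Mathlib
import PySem

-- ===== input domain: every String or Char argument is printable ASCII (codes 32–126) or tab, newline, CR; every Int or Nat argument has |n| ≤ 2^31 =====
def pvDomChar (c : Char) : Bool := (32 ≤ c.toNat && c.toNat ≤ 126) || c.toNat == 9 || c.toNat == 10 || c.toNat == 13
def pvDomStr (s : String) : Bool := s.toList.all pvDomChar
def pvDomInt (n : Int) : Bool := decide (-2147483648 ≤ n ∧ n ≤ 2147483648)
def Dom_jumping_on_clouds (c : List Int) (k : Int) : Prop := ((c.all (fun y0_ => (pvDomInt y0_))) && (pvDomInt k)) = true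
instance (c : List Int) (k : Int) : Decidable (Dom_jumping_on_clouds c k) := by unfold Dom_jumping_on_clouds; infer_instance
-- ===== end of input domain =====

-- B replaces A's data-dependent "walk until the index is 0 again" while-loop by a
-- fixed-count loop whose length n // gcd(n, k) is computed up front (alternative decomposition).

-- ===== PORT A =====
-- helper cumulus_or_thunderheads
def pvCumulus (cloud : Int) : Int := if cloud == 0 then 1 else 3

-- A's while-loop; fuel only makes the recursion total (the loop runs at most
-- c.length iterations on every input admitted by Pre_); none = IndexError / fuel out.
def pvLoopA (c : List Int) (k : Int) : Nat → Int → Int → Option Int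
  | 0, _, _ => none
  | fuel+1, count, index =>
    if index = 0 then some count
    else
      match PySem.List.pyGet? c index with
      | none => none
      | some v =>
        let count1 := count + pvCumulus v
        let index2 := if (c.length : Int) ≤ index + k then PySem.Int.mod (index + k) c.length else index + k
        if index2 = 0 then
          match PySem.List.pyGet? c index2 with
          | none => none
          | some v0 => pvLoopA c k fuel (count1 + pvCumulus v0) index2
        else pvLoopA c k fuel count1 index2

def jumping_on_clouds (c : List Int) (k : Int) : Int :=
  if c.length = 0 then 0  -- Python: ZeroDivisionError on k % len(c); excluded by Pre_
  else
    let index := PySem.Int.mod k (c.length : Int)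
    if index = 0 then
      match PySem.List.pyGet? c index with
      | some v => 100 - pvCumulus v
      | none => 0
    else
      match pvLoopA c k (c.length + 1) 0 index with
      | some count => 100 - count
      | none => 0  -- IndexError; excluded by Pre_

-- ===== PORT B =====
-- Source B's hand-written Euclid loop 'while b: a, b = b, a % b' followed by abs(a)
def pvGcd (a b : Int) : Int :=
  if b = 0 then (a.natAbs : Int) else pvGcd b (PySem.Int.mod a b)
termination_by b.natAbs
decreasing_by
  rcases lt_or_gt_of_ne (by assumption : b ≠ 0) with hb | hb
  · have h := PySem.Int.mod_neg_bounds (a := a) hb; omega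
  · have h1 := PySem.Int.mod_nonneg (a := a) hb
    have h2 := PySem.Int.mod_lt (a := a) hb; omega

def jumping_on_clouds_alt (c : List Int) (k : Int) : Int :=
  let n : Int := c.length
  let steps : Int := PySem.Int.floordiv n (pvGcd n k)
  let cost : Int := (PySem.List.pyRange 1 (steps + 1) 1).foldl
    (fun cost j => cost + (if PySem.List.pyGetD c (PySem.Int.mod (j * k) n) 0 == 0 then 1 else 3)) 0
  100 - cost

-- ===== PRECONDITION & SPEC =====
-- Pre_ excludes exactly the inputs where A raises: empty c (ZeroDivisionError), and negative k
-- whose backward index walk under-runs the list (IndexError) — for k < 0 A returns normally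
-- exactly when k divides k % len(c).
def Pre_jumping_on_clouds (c : List Int) (k : Int) : Prop :=
  c ≠ [] ∧ (0 ≤ k ∨ k ∣ PySem.Int.mod k (c.length : Int))
instance (c : List Int) (k : Int) : Decidable (Pre_jumping_on_clouds c k) := by
  unfold Pre_jumping_on_clouds; infer_instance

def pvWitness_jumping_on_clouds : List Int × Int := ([1, 0, 1, 0, 0], 2)

def Spec_jumping_on_clouds (c : List Int) (k : Int) (out : Int) : Prop := out = jumping_on_clouds_alt c k
instance (c : List Int) (k : Int) (out : Int) : Decidable (Spec_jumping_on_clouds c k out) := by unfold Spec_jumping_on_clouds; infer_instance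

-- ===== CLAIM (what is proved, stated in full; the proofs are below) =====
def Claim_equal_jumping_on_clouds : Prop := ∀ (c : List Int) (k : Int), Dom_jumping_on_clouds c k → Pre_jumping_on_clouds c k → Spec_jumping_on_clouds c k (jumping_on_clouds c k)

-- ===== LEMMAS AND PROOFS =====

-- the index of the j-th landing, and its cost
def posIdx (c : List Int) (k : Int) (j : Nat) : Int := PySem.Int.mod ((j : Int) * k) (c.length : Int)
def fAt (c : List Int) (k : Int) (j : Nat) : Int := pvCumulus (PySem.List.pyGetD c (posIdx c k j) 0)
-- number of landings
def stepsN (c : List Int) (k : Int) : Nat := c.length / Nat.gcd c.length k.natAbs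

lemma pvLoopA_at_zero (c : List Int) (k : Int) (fuel : Nat) (count : Int) :
    pvLoopA c k (fuel + 1) count 0 = some count := by
  rw [pvLoopA]
  simp

lemma pvGcd_eq (a b : Int) : pvGcd a b = (Int.gcd a b : Int) := by
  rw [pvGcd]
  split
  · rename_i h; subst h; simp [Int.gcd]
  · rename_i h
    rw [pvGcd_eq b (PySem.Int.mod a b)]
    have hm := PySem.Int.floordiv_mul_add_mod a b
    have h2 : PySem.Int.mod a b = a + b * (-(PySem.Int.floordiv a b)) := by linarith
    congr 1
    rw [h2, Int.gcd_add_mul_left_right b a (-(PySem.Int.floordiv a b)), Int.gcd_comm]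
termination_by b.natAbs
decreasing_by
  rcases lt_or_gt_of_ne (by assumption : b ≠ 0) with hb | hb
  · have hb2 := PySem.Int.mod_neg_bounds (a := a) hb; omega
  · have h1 := PySem.Int.mod_nonneg (a := a) hb
    have h2 := PySem.Int.mod_lt (a := a) hb; omega

lemma stepsN_pos (c : List Int) (k : Int) (hn : 0 < c.length) : 0 < stepsN c k := by
  exact Nat.div_pos (Nat.le_of_dvd hn (Nat.gcd_dvd_left _ _)) (Nat.gcd_pos_of_pos_left _ hn)

lemma stepsN_le (c : List Int) (k : Int) : stepsN c k ≤ c.length := by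
  exact Nat.div_le_self _ _

-- the stepsN-th landing is back at index 0
lemma posIdx_stepsN (c : List Int) (k : Int) :
    posIdx c k (stepsN c k) = 0 := by
  unfold posIdx
  rw [PySem.Int.mod_eq_zero_iff_dvd]
  rw [Int.ofNat_dvd_left, Int.natAbs_mul, Int.natAbs_natCast]
  have hK : k.natAbs / Nat.gcd c.length k.natAbs * Nat.gcd c.length k.natAbs = k.natAbs :=
    Nat.div_mul_cancel (Nat.gcd_dvd_right _ _)
  have hL : c.length / Nat.gcd c.length k.natAbs * Nat.gcd c.length k.natAbs = c.length :=
    Nat.div_mul_cancel (Nat.gcd_dvd_left _ _)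
  refine ⟨k.natAbs / Nat.gcd c.length k.natAbs, ?_⟩
  unfold stepsN
  calc c.length / Nat.gcd c.length k.natAbs * k.natAbs
      = c.length / Nat.gcd c.length k.natAbs *
          (k.natAbs / Nat.gcd c.length k.natAbs * Nat.gcd c.length k.natAbs) := by rw [hK]
    _ = (c.length / Nat.gcd c.length k.natAbs * Nat.gcd c.length k.natAbs) *
          (k.natAbs / Nat.gcd c.length k.natAbs) := by ring
    _ = c.length * (k.natAbs / Nat.gcd c.length k.natAbs) := by rw [hL]

-- no earlier landing is at index 0
lemma posIdx_ne_zero (c : List Int) (k : Int) (hn : 0 < c.length)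
    (t : Nat) (h1 : 1 ≤ t) (h2 : t < stepsN c k) : posIdx c k t ≠ 0 := by
  intro h0
  unfold posIdx at h0
  rw [PySem.Int.mod_eq_zero_iff_dvd, Int.ofNat_dvd_left, Int.natAbs_mul, Int.natAbs_natCast] at h0
  have hgpos : 0 < Nat.gcd c.length k.natAbs := Nat.gcd_pos_of_pos_left _ hn
  have hK : k.natAbs / Nat.gcd c.length k.natAbs * Nat.gcd c.length k.natAbs = k.natAbs :=
    Nat.div_mul_cancel (Nat.gcd_dvd_right _ _)
  have hL : c.length / Nat.gcd c.length k.natAbs * Nat.gcd c.length k.natAbs = c.length :=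
    Nat.div_mul_cancel (Nat.gcd_dvd_left _ _)
  have hdvd : c.length / Nat.gcd c.length k.natAbs ∣ t * (k.natAbs / Nat.gcd c.length k.natAbs) := by
    refine (Nat.mul_dvd_mul_iff_right hgpos).mp ?_
    rw [hL, mul_assoc, hK]
    exact h0
  have hdt : c.length / Nat.gcd c.length k.natAbs ∣ t :=
    (Nat.coprime_div_gcd_div_gcd hgpos).dvd_of_dvd_mul_right hdvd
  have hle := Nat.le_of_dvd (by omega) hdt
  unfold stepsN at h2
  omega

-- for negative k inside Pre_, the walk's actual index is r + (t-1)k, which never leaves [0, n)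
lemma posIdx_formula_neg (c : List Int) (k : Int) (hn : 0 < c.length) (hkneg : k < 0)
    (hdvd : k ∣ PySem.Int.mod k (c.length : Int)) :
    ∀ t, 1 ≤ t → t ≤ stepsN c k →
      posIdx c k t = PySem.Int.mod k (c.length : Int) + ((t : Int) - 1) * k := by
  have hpos : (0:Int) < (c.length:Int) := by exact_mod_cast hn
  intro t
  induction t with
  | zero => omega
  | succ t ih =>
    intro _ hle
    rcases Nat.eq_zero_or_pos t with rfl | ht1
    · unfold posIdx; norm_num
    · have hf := ih ht1 (by omega)
      have hne := posIdx_ne_zero c k hn t ht1 (by omega)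
      have h0 : 0 ≤ posIdx c k t := PySem.Int.mod_nonneg _ hpos
      have hdvd2 : k ∣ posIdx c k t := by
        rw [hf]; exact dvd_add hdvd (dvd_mul_left k _)
      have hge : -k ≤ posIdx c k t := by
        obtain ⟨m, hm⟩ := hdvd2
        have hm0 : m < 0 := by
          by_contra hmn
          have hkm : k * m ≤ 0 :=
            mul_nonpos_of_nonpos_of_nonneg (le_of_lt hkneg) (by omega)
          have hgt : 0 < posIdx c k t := lt_of_le_of_ne h0 (Ne.symm hne)
          omega
        have hmul : (-k) * 1 ≤ (-k) * (-m) := by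
          apply mul_le_mul_of_nonneg_left (by omega) (by omega)
        rw [hm]; nlinarith
      have hlt2 : posIdx c k t < (c.length:Int) := PySem.Int.mod_lt _ hpos
      have hcong : ((t:Int) + 1) * k % (c.length:Int) = posIdx c k t + k := by
        have e1 : (posIdx c k t + k) % (c.length:Int) = posIdx c k t + k :=
          Int.emod_eq_of_lt (by omega) (by omega)
        have e2 : (posIdx c k t + k) % (c.length:Int) = ((t:Int) * k + k) % (c.length:Int) := by
          unfold posIdx; rw [PySem.Int.mod_eq_emod_of_pos hpos, Int.emod_add_emod]
        calc ((t:Int)+1) * k % (c.length:Int) = ((t:Int) * k + k) % (c.length:Int) := by ring_nf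
          _ = posIdx c k t + k := e2.symm.trans e1
      unfold posIdx
      rw [PySem.Int.mod_eq_emod_of_pos hpos]
      push_cast
      rw [hcong, hf]; ring

-- A's index update sends landing t to landing t+1 (both sign regimes of k, under Pre_)
lemma idx_step (c : List Int) (k : Int) (hn : 0 < c.length)
    (hk : 0 ≤ k ∨ k ∣ PySem.Int.mod k (c.length : Int))
    (t : Nat) (h1 : 1 ≤ t) (h2 : t < stepsN c k) :
    (if (c.length : Int) ≤ posIdx c k t + k then PySem.Int.mod (posIdx c k t + k) (c.length : Int)
     else posIdx c k t + k) = posIdx c k (t + 1) := by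
  have hpos : (0:Int) < (c.length:Int) := by exact_mod_cast hn
  have hx0 : 0 ≤ posIdx c k t := PySem.Int.mod_nonneg _ hpos
  have hx1 : posIdx c k t < (c.length:Int) := PySem.Int.mod_lt _ hpos
  by_cases hk0 : 0 ≤ k
  · have hcong : (posIdx c k t + k) % (c.length:Int) = posIdx c k (t+1) := by
      unfold posIdx
      rw [PySem.Int.mod_eq_emod_of_pos hpos, PySem.Int.mod_eq_emod_of_pos hpos, Int.emod_add_emod]
      congr 1; push_cast; ring
    split
    · rw [PySem.Int.mod_eq_emod_of_pos hpos, hcong]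
    · rename_i hsplit
      rw [← hcong, Int.emod_eq_of_lt (by omega) (by omega)]
  · rw [Int.not_le] at hk0
    have hdvd := hk.resolve_left (by omega)
    have hf1 := posIdx_formula_neg c k hn hk0 hdvd t h1 (by omega)
    have hf2 := posIdx_formula_neg c k hn hk0 hdvd (t+1) (by omega) (by omega)
    rw [if_neg (by omega), hf1, hf2]; push_cast; ring

lemma pyGet?_posIdx (c : List Int) (k : Int) (hn : 0 < c.length) (j : Nat) :
    PySem.List.pyGet? c (posIdx c k j) = some (PySem.List.pyGetD c (posIdx c k j) 0) := by
  have hpos : (0:Int) < (c.length:Int) := by exact_mod_cast hn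
  have h0 : 0 ≤ posIdx c k j := PySem.Int.mod_nonneg _ hpos
  have h1 : posIdx c k j < (c.length:Int) := PySem.Int.mod_lt _ hpos
  rw [PySem.List.pyGet?_eq_some_getElem c h0 h1, PySem.List.pyGetD_eq_getElem c 0 h0 h1]

-- A's loop, started at landing j, sums the costs of landings j .. stepsN
lemma loopA_eq (c : List Int) (k : Int) (hn : 0 < c.length)
    (hk : 0 ≤ k ∨ k ∣ PySem.Int.mod k (c.length : Int)) :
    ∀ (m j : Nat) (fuel : Nat) (count : Int), j + m = stepsN c k → 1 ≤ j → 1 ≤ m →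
      stepsN c k + 1 - j ≤ fuel →
      pvLoopA c k fuel count (posIdx c k j) =
        some (count + ∑ t ∈ Finset.Icc j (stepsN c k), fAt c k t) := by
  intro m
  induction m with
  | zero => intro j fuel count hjm hj hm hfuel; omega
  | succ m ih =>
    intro j fuel count hjm hj _ hfuel
    have hjlt : j < stepsN c k := by omega
    obtain ⟨f1, rfl⟩ : ∃ f1, fuel = f1 + 1 := ⟨fuel - 1, by omega⟩
    have hne := posIdx_ne_zero c k hn j hj hjlt
    have hget := pyGet?_posIdx c k hn j
    have hstep := idx_step c k hn hk j hj hjlt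
    have hfAt : pvCumulus (PySem.List.pyGetD c (posIdx c k j) 0) = fAt c k j := rfl
    rw [pvLoopA, if_neg hne, hget]
    simp only [hstep, hfAt]
    by_cases h0 : posIdx c k (j + 1) = 0
    · have hj1 : j + 1 = stepsN c k := by
        by_contra hne2
        exact posIdx_ne_zero c k hn (j + 1) (by omega) (by omega) h0
      have hget0 := pyGet?_posIdx c k hn (j + 1)
      have hfAt0 : pvCumulus (PySem.List.pyGetD c (posIdx c k (j + 1)) 0) = fAt c k (j + 1) := rfl
      rw [h0] at hget0 hfAt0
      rw [if_pos h0, h0, hget0]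
      obtain ⟨f2, rfl⟩ : ∃ f2, f1 = f2 + 1 := ⟨f1 - 1, by omega⟩
      simp only [pvLoopA_at_zero]
      rw [hfAt0, ← hj1, Finset.sum_Icc_succ_top (by omega : j ≤ j + 1),
        Finset.Icc_self, Finset.sum_singleton]
      congr 1
      ring
    · have hj1lt : j + 1 < stepsN c k := by
        have hle : j + 1 ≤ stepsN c k := by omega
        rcases eq_or_lt_of_le hle with he | hl
        · exact absurd (he ▸ posIdx_stepsN c k) h0
        · exact hl
      rw [if_neg h0]
      rw [ih (j + 1) f1 (count + fAt c k j) (by omega) (by omega) (by omega) (by omega)]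
      rw [← Finset.insert_Icc_add_one_left_eq_Icc (by omega : j ≤ stepsN c k),
        Finset.sum_insert (by simp)]
      congr 1
      ring

-- B's fold over range(1, s+1) is the same sum
lemma foldB_eq (F : Int → Int) :
    ∀ (s : Nat) (a : Int), (PySem.List.pyRange 1 ((s : Int) + 1) 1).foldl (fun acc j => acc + F j) a =
      a + ∑ t ∈ Finset.Icc 1 s, F (t : Int) := by
  intro s
  induction s with
  | zero =>
    intro a
    rw [show ((0:Nat):Int) + 1 = 1 by norm_num, PySem.List.pyRange_one]
    norm_num
  | succ s ih =>
    intro a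
    rw [PySem.List.pyRange_one]
    rw [show ((((s+1):Nat):Int) + 1 - 1).toNat = s + 1 by omega]
    rw [List.range_succ, List.map_append, List.foldl_append]
    have hpre : List.map (fun (t : Nat) => (1:Int) + (t:Int)) (List.range s) =
        PySem.List.pyRange 1 ((s:Int) + 1) 1 := by
      rw [PySem.List.pyRange_one, show (((s:Int) + 1) - 1).toNat = s by omega]
    rw [hpre, ih]
    simp only [List.map, List.foldl]
    rw [Finset.sum_Icc_succ_top (by omega : 1 ≤ s + 1)]
    rw [show ((1:Int) + (s:Int)) = (((s+1):Nat):Int) by push_cast; ring]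
    ring

lemma main_eq (c : List Int) (k : Int) (hc : c ≠ [])
    (hk : 0 ≤ k ∨ k ∣ PySem.Int.mod k (c.length : Int)) :
    jumping_on_clouds c k = jumping_on_clouds_alt c k := by
  have hn : 0 < c.length := List.length_pos_of_ne_nil hc
  have hpos : (0:Int) < (c.length:Int) := by exact_mod_cast hn
  have hsteps : PySem.Int.floordiv (c.length : Int) (pvGcd (c.length : Int) k) =
      ((stepsN c k : Nat) : Int) := by
    rw [pvGcd_eq]
    rw [show Int.gcd (c.length : Int) k = Nat.gcd c.length k.natAbs by simp [Int.gcd]]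
    exact_mod_cast PySem.Int.floordiv_natCast c.length (Nat.gcd c.length k.natAbs)
  unfold jumping_on_clouds jumping_on_clouds_alt
  simp only [hsteps]
  rw [foldB_eq _ (stepsN c k) 0]
  rw [if_neg (by omega)]
  have hp1 : posIdx c k 1 = PySem.Int.mod k (c.length : Int) := by
    unfold posIdx; norm_num
  have hF : ∀ t : Nat, (if PySem.List.pyGetD c (PySem.Int.mod ((t:Int) * k) (c.length:Int)) 0 == 0
      then (1:Int) else 3) = fAt c k t := fun t => rfl
  by_cases h1 : PySem.Int.mod k (c.length : Int) = 0
  · have hs1 : stepsN c k = 1 := by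
      have hpos1 := stepsN_pos c k hn
      by_contra hne
      exact posIdx_ne_zero c k hn 1 le_rfl (by omega) (hp1.trans h1)
    rw [if_pos h1, h1]
    have hget := pyGet?_posIdx c k hn 1
    rw [hp1, h1] at hget
    rw [hget, hs1, Finset.Icc_self, Finset.sum_singleton, hF 1]
    have hfAt1 : fAt c k 1 = pvCumulus (PySem.List.pyGetD c 0 0) := by
      unfold fAt; rw [hp1, h1]
    rw [hfAt1]
    ring
  · rw [if_neg h1, ← hp1]
    have hs2 : 2 ≤ stepsN c k := by
      have hpos1 := stepsN_pos c k hn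
      rcases Nat.lt_or_ge (stepsN c k) 2 with hlt | hge
      · exfalso
        have : stepsN c k = 1 := by omega
        exact h1 (hp1.symm.trans (this ▸ posIdx_stepsN c k))
      · exact hge
    rw [loopA_eq c k hn hk (stepsN c k - 1) 1 (c.length + 1) 0 (by omega) le_rfl (by omega)
      (by have := stepsN_le c k; omega)]
    simp only [hF]

-- ===== VERDICT (by name: the statement is the Claim_ definition above) =====
theorem jumping_on_clouds_spec : Claim_equal_jumping_on_clouds := by
  intro c k _ hpre
  exact main_eq c k hpre.1 hpre.2
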